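-- pv_equiv track=rewrite | github.com/patrickfrey/strusWikipediaSearch | scripts/strusnlp.py | matchNameSubset
-- ===== SOURCE A (Python) =====
-- from copy import deepcopy
--
-- def matchNameSubset( name, candidate):
--     cd = deepcopy(candidate)
--     if not name:
--         return False
--     for nam in name:
--         if nam == '-':
--             if nam not in cd:
--                 return False
--             continue
--         found = False
--         for eidx,elem in enumerate(cd):
--             if nam == elem:
--                 del cd[ eidx]
--                 found = True
--                 break
--         if not found:
--             return False
--     return True
-- ===== SOURCE B (Python) =====
-- def matchNameSubset(name, candidate):
--     if not name:
--         return False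
--     cn = {}
--     for w in name:
--         cn[w] = cn.get(w, 0) + 1
--     cc = {}
--     for w in candidate:
--         cc[w] = cc.get(w, 0) + 1
--     for key, cnt in cn.items():
--         if key == '-':
--             if '-' not in cc:
--                 return False
--         elif cc.get(key, 0) < cnt:
--             return False
--     return True
-- ===== Notes on version B (the rewrite author's own statement) =====
-- stated objective: simpler
-- what changed: Replaces the quadratic scan-and-delete over a mutated copy of candidate with two frequency tables built once and a single comparison pass over name's table ('-' checked for presence only, matching A's never-consume handling).
import Mathlib
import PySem

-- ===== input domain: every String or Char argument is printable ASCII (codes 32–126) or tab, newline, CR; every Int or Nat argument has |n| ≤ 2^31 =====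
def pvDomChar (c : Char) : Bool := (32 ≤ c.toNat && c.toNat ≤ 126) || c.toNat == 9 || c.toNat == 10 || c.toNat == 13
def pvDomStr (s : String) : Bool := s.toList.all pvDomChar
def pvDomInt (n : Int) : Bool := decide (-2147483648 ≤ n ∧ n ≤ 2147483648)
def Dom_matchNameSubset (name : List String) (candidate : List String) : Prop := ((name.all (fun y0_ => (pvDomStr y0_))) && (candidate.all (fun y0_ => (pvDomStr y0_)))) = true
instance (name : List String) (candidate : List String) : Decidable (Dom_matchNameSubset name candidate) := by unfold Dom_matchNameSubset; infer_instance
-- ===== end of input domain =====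

-- B replaces A's quadratic scan-and-delete over a mutated copy of candidate by two
-- frequency tables built once and one comparison pass (objective: simpler).

-- ===== PORT A =====
-- inner loop: 'for eidx,elem in enumerate(cd): if nam == elem: del cd[eidx]; break'
def pvRemoveFirst (nam : String) : List String → Option (List String)
  | [] => none
  | elem :: rest =>
    if nam = elem then some rest
    else (pvRemoveFirst nam rest).map (fun cd' => elem :: cd')

-- outer loop: 'for nam in name: …' with early returns
def pvLoopA : List String → List String → Bool
  | [], _ => true
  | nam :: rest, cd =>
    if nam = "-" then
      if ¬ (nam ∈ cd) then false else pvLoopA rest cd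
    else
      match pvRemoveFirst nam cd with
      | none => false
      | some cd' => pvLoopA rest cd'

def matchNameSubset (name : List String) (candidate : List String) : Bool :=
  if name = [] then false else pvLoopA name candidate

-- ===== PORT B =====
-- 'for key, cnt in cn.items(): …' with early returns
def pvCheckItems : List (String × Int) → PySem.Dict String Int → Bool
  | [], _ => true
  | (key, cnt) :: rest, cc =>
    if key = "-" then
      if ¬ cc.contains "-" then false else pvCheckItems rest cc
    else if cc.getD key 0 < cnt then false
    else pvCheckItems rest cc

def matchNameSubset_alt (name : List String) (candidate : List String) : Bool :=
  if name = [] then false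
  else
    let cn := name.foldl (fun d x => d.insert x (d.getD x 0 + 1)) (PySem.Dict.empty : PySem.Dict String Int)
    let cc := candidate.foldl (fun d x => d.insert x (d.getD x 0 + 1)) (PySem.Dict.empty : PySem.Dict String Int)
    pvCheckItems cn.items cc

-- ===== PRECONDITION & SPEC =====
def Spec_matchNameSubset (name : List String) (candidate : List String) (out : Bool) : Prop := out = matchNameSubset_alt name candidate
instance (name : List String) (candidate : List String) (out : Bool) : Decidable (Spec_matchNameSubset name candidate out) := by unfold Spec_matchNameSubset; infer_instance

-- ===== CLAIM (what is proved, stated in full; the proofs are below) =====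
def Claim_equal_matchNameSubset : Prop := ∀ (name : List String) (candidate : List String), Dom_matchNameSubset name candidate → Spec_matchNameSubset name candidate (matchNameSubset name candidate)

-- ===== LEMMAS AND PROOFS =====

-- common characterisation: every element of name passes its check against cd
def pvGood (name cd : List String) : Prop :=
  ∀ k ∈ name, (k = "-" → "-" ∈ cd) ∧ (k ≠ "-" → name.count k ≤ cd.count k)

theorem pvRemoveFirst_eq (nam : String) (cd : List String) :
    pvRemoveFirst nam cd = if nam ∈ cd then some (cd.erase nam) else none := by
  induction cd with
  | nil => simp [pvRemoveFirst]
  | cons e rest ih =>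
    by_cases h : nam = e
    · simp [pvRemoveFirst, h, List.erase_cons_head]
    · simp only [pvRemoveFirst, if_neg h, ih]
      by_cases hm : nam ∈ rest
      · simp [hm, h, beq_iff_eq, Ne.symm h]
      · simp [List.mem_cons, hm, h]

theorem pvLoopA_iff (name : List String) : ∀ cd, pvLoopA name cd = true ↔ pvGood name cd := by
  induction name with
  | nil => intro cd; simp [pvLoopA, pvGood]
  | cons nam rest ih =>
    intro cd
    by_cases hdash : nam = "-"
    · subst hdash
      rw [show pvLoopA ("-" :: rest) cd = if ¬ ("-" ∈ cd) then false else pvLoopA rest cd from rfl]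
      by_cases hm : "-" ∈ cd
      · rw [if_neg (by simp [hm]), ih]
        constructor
        · intro h k hk
          rcases List.mem_cons.mp hk with rfl | hk'
          · exact ⟨fun _ => hm, fun hne => absurd rfl hne⟩
          · refine ⟨fun he => hm, fun hne => ?_⟩
            have := (h k hk').2 hne
            rwa [List.count_cons_of_ne (Ne.symm hne)]
        · intro h k hk
          have := h k (List.mem_cons_of_mem _ hk)
          refine ⟨this.1, fun hne => ?_⟩
          have h2 := this.2 hne
          rwa [List.count_cons_of_ne (Ne.symm hne)] at h2
      · rw [if_pos (by simp [hm])]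
        constructor
        · intro h; exact absurd h (by simp)
        · intro h
          exact absurd ((h "-" (by simp)).1 rfl) hm
    · simp only [pvLoopA, if_neg hdash, pvRemoveFirst_eq]
      by_cases hm : nam ∈ cd
      · simp only [if_pos hm]
        rw [ih]
        have hc1 : 1 ≤ cd.count nam := List.one_le_count_iff.mpr hm
        constructor
        · intro h k hk
          rcases List.mem_cons.mp hk with hk0 | hk'
          · subst hk0
            refine ⟨fun he => absurd he hdash, fun _ => ?_⟩
            by_cases hkr : k ∈ rest
            · have := (h k hkr).2 hdash
              rw [List.count_erase_self] at this
              rw [List.count_cons_self]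
              omega
            · rw [List.count_cons_self, List.count_eq_zero_of_not_mem hkr]
              omega
          · have := h k hk'
            by_cases hkn : k = nam
            · subst hkn
              refine ⟨fun he => absurd he hdash, fun hne => ?_⟩
              have h2 := this.2 hne
              rw [List.count_erase_self] at h2
              rw [List.count_cons_self]
              omega
            · refine ⟨fun he => ?_, fun hne => ?_⟩
              · have h1 := this.1 he
                subst he
                exact List.mem_of_mem_erase h1
              · have h2 := this.2 hne
                rw [List.count_erase_of_ne hkn] at h2
                rwa [List.count_cons_of_ne (by simpa using Ne.symm hkn)]
        · intro h k hk
          have hmem := h k (List.mem_cons_of_mem _ hk)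
          by_cases hkn : k = nam
          · subst hkn
            refine ⟨fun he => absurd he hdash, fun hne => ?_⟩
            have h2 := hmem.2 hne
            rw [List.count_cons_self] at h2
            rw [List.count_erase_self]
            omega
          · refine ⟨fun he => ?_, fun hne => ?_⟩
            · subst he
              exact (List.mem_erase_of_ne hkn).mpr (hmem.1 rfl)
            · have h2 := hmem.2 hne
              rw [List.count_cons_of_ne (by simpa using Ne.symm hkn)] at h2
              rwa [List.count_erase_of_ne hkn]
      · simp only [if_neg hm]
        constructor
        · intro h; exact absurd h (by simp)
        · intro h
          have := (h nam (by simp)).2 hdash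
          rw [List.count_cons_self] at this
          have : 1 ≤ cd.count nam := by omega
          exact (hm (List.one_le_count_iff.mp this)).elim

theorem pvCheckItems_iff (l : List (String × Int)) (cc : PySem.Dict String Int) :
    pvCheckItems l cc = true ↔
      ∀ p ∈ l, (p.1 = "-" → cc.contains "-" = true) ∧ (p.1 ≠ "-" → ¬ cc.getD p.1 0 < p.2) := by
  induction l with
  | nil => simp [pvCheckItems]
  | cons p rest ih =>
    obtain ⟨key, cnt⟩ := p
    by_cases hk : key = "-"
    · subst hk
      rw [show pvCheckItems (("-", cnt) :: rest) cc = if ¬ (cc.contains "-" = true) then false else pvCheckItems rest cc from rfl]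
      by_cases hc : cc.contains "-" = true
      · rw [if_neg (not_not_intro hc), ih]
        constructor
        · intro h q hq
          rcases List.mem_cons.mp hq with rfl | hq'
          · exact ⟨fun _ => hc, fun hne => absurd rfl hne⟩
          · exact h q hq'
        · intro h q hq; exact h q (List.mem_cons_of_mem _ hq)
      · rw [if_pos hc]
        constructor
        · intro h; exact absurd h (by simp)
        · intro h
          have := (h ("-", cnt) (by simp)).1 rfl
          simp [hc] at this
    · simp only [pvCheckItems, if_neg hk]
      by_cases hlt : cc.getD key 0 < cnt
      · simp only [if_pos hlt]
        constructor
        · intro h; exact absurd h (by simp)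
        · intro h
          exact absurd hlt ((h (key, cnt) (by simp)).2 hk)
      · simp only [if_neg hlt, ih]
        constructor
        · intro h q hq
          rcases List.mem_cons.mp hq with rfl | hq'
          · exact ⟨fun he => absurd he hk, fun _ => hlt⟩
          · exact h q hq'
        · intro h q hq; exact h q (List.mem_cons_of_mem _ hq)

theorem matchNameSubset_alt_iff (name candidate : List String) (hne : name ≠ []) :
    matchNameSubset_alt name candidate = true ↔ pvGood name candidate := by
  unfold matchNameSubset_alt
  rw [if_neg hne]
  show pvCheckItems ((name.foldl (fun d x => d.insert x (d.getD x 0 + 1)) PySem.Dict.empty).items) (candidate.foldl (fun d x => d.insert x (d.getD x 0 + 1)) PySem.Dict.empty) = true ↔ pvGood name candidate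
  rw [PySem.Dict.foldl_insert_getD_add_one_eq_counter,
      PySem.Dict.foldl_insert_getD_add_one_eq_counter,
      PySem.Dict.items_counter, pvCheckItems_iff]
  constructor
  · intro h k hk
    have hset : k ∈ PySem.Set.ofList name := (PySem.Set.mem_ofList _ _).mpr hk
    have := h (k, (name.count k : Int)) (List.mem_map.mpr ⟨k, hset, rfl⟩)
    refine ⟨fun he => ?_, fun hne' => ?_⟩
    · have hc := this.1 he
      rw [PySem.Dict.contains_counter] at hc
      simpa using hc
    · have h2 := this.2 hne'
      rw [PySem.Dict.getD_counter] at h2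
      simp only [not_lt] at h2
      exact_mod_cast h2
  · intro h p hp
    obtain ⟨k, hkset, rfl⟩ := List.mem_map.mp hp
    have hk : k ∈ name := (PySem.Set.mem_ofList _ _).mp hkset
    have := h k hk
    refine ⟨fun he => ?_, fun hne' => ?_⟩
    · rw [PySem.Dict.contains_counter]
      simpa using this.1 he
    · rw [PySem.Dict.getD_counter]
      have h2 := this.2 hne'
      simp only [not_lt]
      exact_mod_cast h2

-- ===== VERDICT (by name: the statement is the Claim_ definition above) =====
theorem matchNameSubset_spec : Claim_equal_matchNameSubset := by
  intro name candidate _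
  unfold Spec_matchNameSubset
  by_cases hne : name = []
  · subst hne; rfl
  · unfold matchNameSubset
    rw [if_neg hne]
    have h1 := pvLoopA_iff name candidate
    have h2 := matchNameSubset_alt_iff name candidate hne
    by_cases hg : pvGood name candidate
    · rw [h1.mpr hg, (h2.mpr hg)]
    · have e1 : pvLoopA name candidate ≠ true := fun hx => hg (h1.mp hx)
      have e2 : matchNameSubset_alt name candidate ≠ true := fun hx => hg (h2.mp hx)
      simp only [Bool.not_eq_true] at e1 e2
      rw [e1, e2]
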